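-- pv_equiv track=rewrite | github.com/dylanhoke/Python-Algorithm-Exercises-Solutions | Sorting/Prefixstr.py | solution
-- ===== SOURCE A (Python) =====
-- def solution(strings, sources):
--
--
--     result = []
--
--     for source in sources:
--
--         prefix = False
--
--         cur = ""
--
--         for string in strings:
--
--             cur += string
--
--             if cur == source:
--
--                 prefix = True
--
--                 break
--
--         result.append(prefix)
--
--     return result
-- ===== SOURCE B (Python) =====
-- def solution(strings, sources):
--     total = "".join(strings)
--     cuts = set()
--     acc = 0
--     for s in strings:
--         acc += len(s)
--         cuts.add(acc)
--     return [len(src) in cuts and total.startswith(src) for src in sources]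
-- ===== Notes on version B (the rewrite author's own statement) =====
-- stated objective: faster
-- what changed: B joins all strings once and indexes the cumulative cut lengths in a set, deciding each source by one length-membership plus one prefix comparison against the shared total, instead of A's per-source rebuilding of every cumulative concatenation.
import Mathlib
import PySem

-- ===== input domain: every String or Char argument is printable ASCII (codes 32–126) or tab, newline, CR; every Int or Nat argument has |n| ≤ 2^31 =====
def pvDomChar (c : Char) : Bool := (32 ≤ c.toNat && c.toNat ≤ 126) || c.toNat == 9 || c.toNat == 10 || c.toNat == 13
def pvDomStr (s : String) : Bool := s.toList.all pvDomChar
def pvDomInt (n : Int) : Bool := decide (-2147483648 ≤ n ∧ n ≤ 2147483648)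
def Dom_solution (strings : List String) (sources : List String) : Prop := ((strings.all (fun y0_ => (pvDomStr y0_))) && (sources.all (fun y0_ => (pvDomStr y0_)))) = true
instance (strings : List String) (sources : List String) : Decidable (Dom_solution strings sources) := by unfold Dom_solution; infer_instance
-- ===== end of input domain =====

-- B joins the strings once and indexes the cumulative cut lengths in a set, replacing
-- A's per-source rebuilding of every cumulative concatenation (objective: faster).

-- ===== PORT A =====
-- A's inner 'for string in strings' loop, carrying the accumulated 'cur' (break = return true)
def solutionInner (source : List Char) (cur : List Char) : List String → Bool
  | [] => false
  | s :: rest =>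
    let cur' := cur ++ s.toList
    if cur' = source then true else solutionInner source cur' rest

def solution (strings : List String) (sources : List String) : List Bool :=
  sources.map (fun source => solutionInner source.toList [] strings)

-- ===== PORT B =====
def solution_alt (strings : List String) (sources : List String) : List Bool :=
  let total : List Char := strings.flatMap String.toList
  let cuts : Nat × PySem.Set Nat :=
    strings.foldl
      (fun p s => (p.1 + s.toList.length, PySem.Set.add p.2 (p.1 + s.toList.length)))
      (0, PySem.Set.empty)
  sources.map (fun src =>
    PySem.Set.contains cuts.2 src.toList.length && PySem.Chars.startswith total src.toList)

-- ===== PRECONDITION & SPEC =====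
def Spec_solution (strings : List String) (sources : List String) (out : List Bool) : Prop := out = solution_alt strings sources
instance (strings : List String) (sources : List String) (out : List Bool) : Decidable (Spec_solution strings sources out) := by unfold Spec_solution; infer_instance

-- ===== CLAIM (what is proved, stated in full; the proofs are below) =====
def Claim_equal_solution : Prop := ∀ (strings : List String) (sources : List String), Dom_solution strings sources → Spec_solution strings sources (solution strings sources)

-- ===== LEMMAS AND PROOFS =====

-- A's inner loop succeeds iff the source equals some cumulative concatenation
theorem solutionInner_iff (strings : List String) (cur src : List Char) :
    solutionInner src cur strings = true ↔
      ∃ k < strings.length, cur ++ (strings.take (k + 1)).flatMap String.toList = src := by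
  induction strings generalizing cur with
  | nil => simp [solutionInner]
  | cons s rest ih =>
    simp only [solutionInner]
    by_cases h : cur ++ s.toList = src
    · simp only [h, if_pos]
      constructor
      · intro _; exact ⟨0, by simp, by simpa using h⟩
      · intro _; trivial
    · rw [if_neg h, ih]
      constructor
      · rintro ⟨k, hk, he⟩
        exact ⟨k + 1, by simpa using hk, by simpa using he⟩
      · rintro ⟨k, hk, he⟩
        cases k with
        | zero => exact absurd (by simpa using he) h
        | succ k =>
          exact ⟨k, by simpa using hk, by simpa using he⟩

-- membership in B's cut-length set
theorem cuts_mem (strings : List String) (a : Nat) (s0 : PySem.Set Nat) (n : Nat) :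
    n ∈ (strings.foldl
        (fun p s => (p.1 + s.toList.length, PySem.Set.add p.2 (p.1 + s.toList.length)))
        (a, s0)).2 ↔
      n ∈ s0 ∨ ∃ k < strings.length,
        n = a + ((strings.take (k + 1)).flatMap String.toList).length := by
  induction strings generalizing a s0 with
  | nil => simp
  | cons s rest ih =>
    simp only [List.foldl_cons, ih, PySem.Set.mem_add]
    constructor
    · rintro (⟨h | h⟩ | ⟨k, hk, he⟩)
      · exact Or.inl h
      · exact Or.inr ⟨0, by simp, by simpa using h⟩
      · refine Or.inr ⟨k + 1, by simpa using hk, ?_⟩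
        simp only [List.take_succ_cons, List.flatMap_cons, List.length_append] at he ⊢
        omega
    · rintro (h | ⟨k, hk, he⟩)
      · exact Or.inl (Or.inl h)
      · cases k with
        | zero =>
          refine Or.inl (Or.inr ?_)
          simpa using he
        | succ k =>
          refine Or.inr ⟨k, by simpa using hk, ?_⟩
          simp only [List.take_succ_cons, List.flatMap_cons, List.length_append] at he ⊢
          omega

-- a cumulative concatenation is a prefix of the total concatenation
theorem take_flatMap_prefix (strings : List String) (k : Nat) :
    (strings.take k).flatMap String.toList <+: strings.flatMap String.toList := by
  conv_rhs => rw [← List.take_append_drop k strings]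
  rw [List.flatMap_append]
  exact List.prefix_append _ _

theorem per_source (strings : List String) (src : List Char) :
    solutionInner src [] strings =
      (PySem.Set.contains
        (strings.foldl
          (fun p s => (p.1 + s.toList.length, PySem.Set.add p.2 (p.1 + s.toList.length)))
          (0, PySem.Set.empty)).2 src.length
        && PySem.Chars.startswith (strings.flatMap String.toList) src) := by
  rw [Bool.eq_iff_iff, solutionInner_iff, Bool.and_eq_true, PySem.Set.contains_iff,
    PySem.Chars.startswith_iff, cuts_mem]
  constructor
  · rintro ⟨k, hk, he⟩
    simp only [List.nil_append] at he
    constructor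
    · refine Or.inr ⟨k, hk, ?_⟩
      rw [← he]; omega
    · rw [← he]; exact take_flatMap_prefix strings (k + 1)
  · rintro ⟨hm, hp⟩
    rcases hm with h | ⟨k, hk, he⟩
    · exact absurd h (by simp [PySem.Set.empty])
    · refine ⟨k, hk, ?_⟩
      simp only [List.nil_append]
      have h1 := take_flatMap_prefix strings (k + 1)
      rw [List.prefix_iff_eq_take] at h1 hp
      rw [h1, hp]
      congr 1
      omega
-- ===== VERDICT (by name: the statement is the Claim_ definition above) =====
theorem solution_spec : Claim_equal_solution := by
  intro strings sources _
  unfold Spec_solution solution solution_alt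
  simp only []
  exact List.map_congr_left (fun src _ => per_source strings src.toList)
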